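-- pv_equiv track=rewrite | github.com/Don-Osipov/Playfair-Cipher | main.py | addX
-- ===== SOURCE A (Python) =====
-- def addX(plaintext):
--     processedMessage = ""
--     while len(plaintext) > 0:
--         double = plaintext[:2]
--         if len(double) < 2:  # if last letter in text does not have a double
--             processedMessage += double[0] + "X"
--             plaintext = plaintext[1:]
--         elif double[0] == double[1]:
--             processedMessage += double[0] + "X"
--             plaintext = plaintext[1:]
--         elif double[0] != double[1]:
--             processedMessage += double[0] + double[1]
--             plaintext = plaintext[2:]
--     return processedMessage
-- ===== SOURCE B (Python) =====
-- def addX(plaintext):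
--     result = []
--     pending = None
--     for c in plaintext:
--         if pending is None:
--             pending = c
--         elif pending == c:
--             result.append(pending)
--             result.append("X")
--             pending = c
--         else:
--             result.append(pending)
--             result.append(c)
--             pending = None
--     if pending is not None:
--         result.append(pending)
--         result.append("X")
--     return "".join(result)
-- ===== Notes on version B (the rewrite author's own statement) =====
-- stated objective: faster
-- what changed: Replaces A's repeated string slicing/rebuilding of the shrinking plaintext with a single left-to-right pass maintaining one state variable (the unmatched first character of a forming pair), appending to a list joined once at the end.
import Mathlib
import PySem

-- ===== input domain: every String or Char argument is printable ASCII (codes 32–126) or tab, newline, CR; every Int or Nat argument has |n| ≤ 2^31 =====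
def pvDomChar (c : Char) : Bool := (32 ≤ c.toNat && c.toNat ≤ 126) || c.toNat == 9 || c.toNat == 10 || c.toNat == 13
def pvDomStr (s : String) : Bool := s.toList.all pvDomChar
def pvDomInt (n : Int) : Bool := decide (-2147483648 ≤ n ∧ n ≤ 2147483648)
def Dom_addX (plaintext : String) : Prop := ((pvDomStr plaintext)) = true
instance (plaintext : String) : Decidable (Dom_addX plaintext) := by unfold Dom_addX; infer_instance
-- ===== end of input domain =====

-- B replaces A's quadratic slice-and-rebuild while-loop by one linear pass with a single
-- held-back-character state variable (objective: faster).

-- ===== PORT A =====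
-- A's while-loop over the shrinking plaintext, as structural recursion on the char list:
-- double = plaintext[:2]; the three branches in A's order.
def addXgo : List Char → List Char
  | [] => []                                   -- len(plaintext) == 0: loop exits, return accumulated
  | [a] => [a, 'X']                            -- len(double) < 2
  | a :: b :: rest =>
    if a = b then a :: 'X' :: addXgo (b :: rest)   -- double[0] == double[1]: advance by 1
    else a :: b :: addXgo rest                     -- double[0] != double[1]: advance by 2
termination_by cs => cs.length

def addX (plaintext : String) : String := String.mk (addXgo plaintext.toList)

-- ===== PORT B =====
-- one fold step of B's for-loop: state = (result so far, pending)
def addXstep (st : List Char × Option Char) (c : Char) : List Char × Option Char :=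
  match st with
  | (acc, none) => (acc, some c)
  | (acc, some p) =>
    if p = c then (acc ++ [p, 'X'], some c)
    else (acc ++ [p, c], none)

def addX_alt (plaintext : String) : String :=
  let st := plaintext.toList.foldl addXstep ([], none)
  match st.2 with
  | none => String.mk st.1                       -- no trailing single char
  | some p => String.mk (st.1 ++ [p, 'X'])       -- flush trailing pending char

-- ===== PRECONDITION & SPEC =====
def Spec_addX (plaintext : String) (out : String) : Prop := out = addX_alt plaintext
instance (plaintext : String) (out : String) : Decidable (Spec_addX plaintext out) := by unfold Spec_addX; infer_instance

-- ===== CLAIM (what is proved, stated in full; the proofs are below) =====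
def Claim_equal_addX : Prop := ∀ (plaintext : String), Dom_addX plaintext → Spec_addX plaintext (addX plaintext)

-- ===== LEMMAS AND PROOFS =====

def finishB (st : List Char × Option Char) : List Char :=
  match st.2 with
  | none => st.1
  | some p => st.1 ++ [p, 'X']

lemma addX_key : ∀ (n : ℕ) (cs : List Char), cs.length ≤ n → ∀ (acc : List Char) (p : Char),
    finishB (cs.foldl addXstep (acc, some p)) = acc ++ addXgo (p :: cs) := by
  intro n
  induction n with
  | zero =>
    intro cs h acc p
    have : cs = [] := List.eq_nil_of_length_eq_zero (Nat.le_zero.mp h)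
    subst this
    simp [finishB, addXgo]
  | succ n ih =>
    intro cs h acc p
    cases cs with
    | nil => simp [finishB, addXgo]
    | cons c cs' =>
      simp only [List.foldl]
      by_cases hpc : p = c
      · rw [show addXstep (acc, some p) c = (acc ++ [p, 'X'], some c) by
          simp [addXstep, hpc]]
        rw [ih cs' (by simpa using Nat.lt_succ_iff.mp (by simpa using h)) (acc ++ [p, 'X']) c]
        simp [addXgo, hpc]
      · rw [show addXstep (acc, some p) c = (acc ++ [p, c], none) by
          simp [addXstep, hpc]]
        cases cs' with
        | nil => simp [finishB, addXgo, hpc]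
        | cons d ds =>
          simp only [List.foldl, addXstep]
          rw [ih ds (by simp at h; omega) (acc ++ [p, c]) d]
          simp [addXgo, hpc]

lemma addX_alt_eq_finishB (plaintext : String) :
    addX_alt plaintext = String.mk (finishB (plaintext.toList.foldl addXstep ([], none))) := by
  unfold addX_alt finishB
  cases h : (plaintext.toList.foldl addXstep ([], none)).2 <;> simp [h]

-- ===== VERDICT (by name: the statement is the Claim_ definition above) =====
theorem addX_spec : Claim_equal_addX := by
  intro plaintext _
  unfold Spec_addX addX
  rw [addX_alt_eq_finishB]
  cases hl : plaintext.toList with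
  | nil => simp [addXgo, finishB]
  | cons c cs =>
    simp only [List.foldl]
    rw [show addXstep ([], none) c = ([], some c) from rfl]
    rw [addX_key cs.length cs le_rfl [] c]
    simp
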